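-- pv_equiv track=rewrite | github.com/codmihaic/bioinf-y4-lab | labs/04_phylogenetics/submissions/codmihaic/mark_conserved.py | find_conserved_runs
-- ===== SOURCE A (Python) =====
-- def find_conserved_runs(symbols):
--     runs = []
--     i = 0
--     while i < len(symbols):
--         if symbols[i] == '*':
--             j = i
--             while j < len(symbols) and symbols[j] == '*':
--                 j += 1
--             runs.append((i+1, j))  # 1-based inclusive
--             i = j
--         else:
--             i += 1
--     return runs
-- ===== SOURCE B (Python) =====
-- def find_conserved_runs(symbols):
--     # Boundary detection: a run starts where '*' has no '*' before it,
--     # ends where '*' has no '*' after it; pair the k-th start with the k-th end.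
--     n = len(symbols)
--     starts = [i + 1 for i in range(n)
--               if symbols[i] == '*' and (i == 0 or symbols[i - 1] != '*')]
--     ends = [i + 1 for i in range(n)
--             if symbols[i] == '*' and (i == n - 1 or symbols[i + 1] != '*')]
--     return list(zip(starts, ends))
-- ===== Notes on version B (the rewrite author's own statement) =====
-- stated objective: alternative
-- what changed: Replaces A's index scan with nested while loops by boundary detection: two filtered passes collect run-start and run-end positions by comparing each '*' with its neighbour, and zip pairs them.
import Mathlib
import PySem

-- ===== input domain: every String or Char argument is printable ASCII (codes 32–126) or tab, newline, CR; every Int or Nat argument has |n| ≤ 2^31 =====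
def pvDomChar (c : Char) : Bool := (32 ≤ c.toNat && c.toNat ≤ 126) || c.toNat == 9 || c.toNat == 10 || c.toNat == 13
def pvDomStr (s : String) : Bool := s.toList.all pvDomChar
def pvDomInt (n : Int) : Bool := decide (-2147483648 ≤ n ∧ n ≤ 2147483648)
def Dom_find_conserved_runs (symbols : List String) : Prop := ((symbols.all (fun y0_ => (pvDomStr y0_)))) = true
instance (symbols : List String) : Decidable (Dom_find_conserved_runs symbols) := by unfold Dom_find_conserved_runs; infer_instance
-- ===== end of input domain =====

-- B replaces A's index scan with nested while loops by boundary detection: two filtered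
-- passes collect run-start and run-end positions by neighbour comparison, zipped together.

-- ===== PORT A =====
-- inner while: 'while j < len(symbols) and symbols[j] == "*": j += 1'
def pvJloop (symbols : List String) (j : Nat) : Nat :=
  if h : j < symbols.length then
    if symbols[j] = "*" then pvJloop symbols (j + 1) else j
  else j
termination_by symbols.length - j

-- used only for the outer loop's termination argument
theorem pvJloop_ge (symbols : List String) (j : Nat) : j ≤ pvJloop symbols j := by
  fun_induction pvJloop symbols j with
  | case1 j h h2 ih => omega
  | case2 j h h2 => omega
  | case3 j h => omega

-- outer while over i with accumulator 'runs'
def pvAloop (symbols : List String) (i : Nat) (runs : List (Int × Int)) : List (Int × Int) :=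
  if h : i < symbols.length then
    if h2 : symbols[i] = "*" then
      let j := pvJloop symbols i
      pvAloop symbols j (runs ++ [(((i : Int) + 1), (j : Int))])
    else pvAloop symbols (i + 1) runs
  else runs
termination_by symbols.length - i
decreasing_by
  · have hge : i + 1 ≤ pvJloop symbols (i + 1) := pvJloop_ge symbols (i + 1)
    have heq : pvJloop symbols i = pvJloop symbols (i + 1) := by
      rw [pvJloop]; simp [h, h2]
    simp only [heq]; omega
  · omega

def find_conserved_runs (symbols : List String) : List (Int × Int) :=
  pvAloop symbols 0 []

-- ===== PORT B =====
-- the two comprehensions over range(n); the guarded neighbour accesses symbols[i-1] /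
-- symbols[i+1] are ported with getD: Python's short-circuit 'or' never reaches them
-- out of range, and the default "" never changes the truth of the disjunction.
def find_conserved_runs_alt (symbols : List String) : List (Int × Int) :=
  let n := symbols.length
  let starts := (List.range n).filterMap (fun i =>
    if symbols.getD i "" = "*" ∧ (i = 0 ∨ ¬ symbols.getD (i - 1) "" = "*")
    then some ((i : Int) + 1) else none)
  let ends := (List.range n).filterMap (fun i =>
    if symbols.getD i "" = "*" ∧ (i = n - 1 ∨ ¬ symbols.getD (i + 1) "" = "*")
    then some ((i : Int) + 1) else none)
  starts.zip ends

-- ===== PRECONDITION & SPEC =====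
def Spec_find_conserved_runs (symbols : List String) (out : List (Int × Int)) : Prop := out = find_conserved_runs_alt symbols
instance (symbols : List String) (out : List (Int × Int)) : Decidable (Spec_find_conserved_runs symbols out) := by unfold Spec_find_conserved_runs; infer_instance

-- ===== CLAIM (what is proved, stated in full; the proofs are below) =====
def Claim_equal_find_conserved_runs : Prop := ∀ (symbols : List String), Dom_find_conserved_runs symbols → Spec_find_conserved_runs symbols (find_conserved_runs symbols)

-- ===== LEMMAS AND PROOFS =====

-- group decomposition: maximal runs of equal consecutive elements, as (key, length)
def pvGroups : List String → List (String × Nat)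
  | [] => []
  | x :: xs =>
    let run := xs.takeWhile (fun y => y == x)
    (x, run.length + 1) :: pvGroups (xs.drop run.length)
termination_by l => l.length
decreasing_by simp [List.length_drop]

-- the runs produced from a list of (key, length) groups starting at 1-based position pos
def pvRuns : List (String × Nat) → Int → List (Int × Int)
  | [], _ => []
  | (k, n) :: gs, pos =>
    (if k = "*" then [(pos, pos + (n : Int) - 1)] else []) ++ pvRuns gs (pos + (n : Int))

theorem pvGroups_nil : pvGroups [] = [] := by rw [pvGroups.eq_def]

theorem pvGroups_cons (x : String) (xs : List String) :
    pvGroups (x :: xs) =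
      (x, (xs.takeWhile (fun y => y == x)).length + 1) ::
        pvGroups (xs.drop (xs.takeWhile (fun y => y == x)).length) := by
  rw [pvGroups.eq_def]

-- characterisation of the inner while loop
theorem pvJloop_eq (symbols : List String) (j : Nat) :
    pvJloop symbols j = j + ((symbols.drop j).takeWhile (fun y => y == "*")).length := by
  fun_induction pvJloop symbols j with
  | case1 j h h2 ih =>
    have hd : symbols.drop j = symbols[j] :: symbols.drop (j + 1) :=
      List.drop_eq_getElem_cons h
    rw [hd, List.takeWhile]
    simp [h2, ih]; omega
  | case2 j h h2 =>
    have hb : (symbols[j] == "*") = false := by simp [h2]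
    have hd : symbols.drop j = symbols[j] :: symbols.drop (j + 1) :=
      List.drop_eq_getElem_cons h
    rw [hd, List.takeWhile]
    simp [hb]
  | case3 j h =>
    have : symbols.drop j = [] := List.drop_eq_nil_of_le (by omega)
    simp [this]

-- skipping one non-'*' element on the left is advancing the position by one
theorem pvRuns_groups_cons_ne (x : String) (t : List String) (pos : Int) (hx : x ≠ "*") :
    pvRuns (pvGroups (x :: t)) pos = pvRuns (pvGroups t) (pos + 1) := by
  rw [pvGroups_cons]
  simp only [pvRuns, hx, if_false, List.nil_append]
  cases t with
  | nil => simp [pvGroups_nil, pvRuns]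
  | cons y t' =>
    by_cases hy : y = x
    · subst hy
      rw [pvGroups_cons]
      simp only [List.takeWhile, beq_self_eq_true, List.length_cons,
        List.drop_succ_cons, pvRuns, hx, if_false, List.nil_append]
      congr 1
      push_cast; ring
    · have hb : (y == x) = false := by simp [hy]
      simp only [List.takeWhile, hb, List.length_nil, List.drop_zero]
      rfl

-- characterisation of the outer while loop in terms of groups of the remaining suffix
theorem pvAloop_eq (symbols : List String) (i : Nat) (runs : List (Int × Int)) :
    pvAloop symbols i runs = runs ++ pvRuns (pvGroups (symbols.drop i)) ((i : Int) + 1) := by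
  fun_induction pvAloop symbols i runs with
  | case1 i runs h h2 j ih =>
    have hd : symbols.drop i = "*" :: symbols.drop (i + 1) := by
      rw [List.drop_eq_getElem_cons h, h2]
    set r := ((symbols.drop (i + 1)).takeWhile (fun y => y == "*")).length with hr
    have hj : j = i + 1 + r := by
      show pvJloop symbols i = _
      rw [pvJloop_eq, hd, List.takeWhile]
      simp [hr]; omega
    have hdj : symbols.drop j = List.drop r (symbols.drop (i + 1)) := by
      rw [List.drop_drop]; congr 1
    have hcast : ((j : Int)) = (i : Int) + 1 + (r : Int) := by rw [hj]; push_cast; ring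
    rw [ih, hd, pvGroups_cons]
    simp only [pvRuns, hdj, hcast, ← hr, List.append_assoc, List.singleton_append]
    congr 3
    push_cast; ring
  | case2 i runs h h2 ih =>
    have hd : symbols.drop i = symbols[i] :: symbols.drop (i + 1) :=
      List.drop_eq_getElem_cons h
    rw [ih, hd, pvRuns_groups_cons_ne _ _ _ h2]
    norm_num
  | case3 i runs h =>
    have : symbols.drop i = [] := List.drop_eq_nil_of_le (by omega)
    rw [this, pvGroups_nil]
    simp [pvRuns]

-- recursive forms of B's two boundary scans
def pvSRec : List String → Bool → Int → List Int
  | [], _, _ => []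
  | x :: xs, b, pos =>
    (if x = "*" ∧ b = false then [pos] else []) ++ pvSRec xs (x == "*") (pos + 1)

def pvERec : List String → Int → List Int
  | [], _ => []
  | x :: xs, pos =>
    (if x = "*" ∧ ¬ xs.headD "" = "*" then [pos] else []) ++ pvERec xs (pos + 1)

-- index forms of the two scans, generalized over position and previous-element flag
def pvSIdx (l : List String) (b : Bool) (pos : Int) : List Int :=
  (List.range l.length).filterMap (fun i =>
    if l.getD i "" = "*" ∧ (if i = 0 then b = false else ¬ l.getD (i - 1) "" = "*")
    then some (pos + i) else none)

def pvEIdx (l : List String) (pos : Int) : List Int :=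
  (List.range l.length).filterMap (fun i =>
    if l.getD i "" = "*" ∧ ¬ l.getD (i + 1) "" = "*" then some (pos + i) else none)

theorem pvSIdx_cons (x : String) (xs : List String) (b : Bool) (pos : Int) :
    pvSIdx (x :: xs) b pos =
      (if x = "*" ∧ b = false then [pos] else []) ++ pvSIdx xs (x == "*") (pos + 1) := by
  have hcomp : ((fun i => if (x :: xs).getD i "" = "*" ∧
        (if i = 0 then b = false else ¬ (x :: xs).getD (i - 1) "" = "*")
      then some (pos + (i : Int)) else none) ∘ Nat.succ)
      = fun i => (if xs.getD i "" = "*" ∧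
          (if i = 0 then (x == "*") = false else ¬ xs.getD (i - 1) "" = "*")
        then some ((pos + 1) + (i : Int)) else none) := by
    funext i
    cases i with
    | zero => by_cases hx : x = "*" <;> simp [hx, add_comm, add_left_comm]
    | succ k => simp [add_comm, add_left_comm]
  simp only [pvSIdx, List.length_cons, List.range_succ_eq_map, List.filterMap_cons,
    List.filterMap_map, hcomp]
  by_cases hc : x = "*" ∧ b = false
  · simp [hc]
  · simp [hc]

theorem pvEIdx_cons (x : String) (xs : List String) (pos : Int) :
    pvEIdx (x :: xs) pos =
      (if x = "*" ∧ ¬ xs.headD "" = "*" then [pos] else []) ++ pvEIdx xs (pos + 1) := by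
  have hcomp : ((fun i => if (x :: xs).getD i "" = "*" ∧ ¬ (x :: xs).getD (i + 1) "" = "*"
      then some (pos + (i : Int)) else none) ∘ Nat.succ)
      = fun i => (if xs.getD i "" = "*" ∧ ¬ xs.getD (i + 1) "" = "*"
        then some ((pos + 1) + (i : Int)) else none) := by
    funext i
    simp [add_comm, add_left_comm]
  simp only [pvEIdx, List.length_cons, List.range_succ_eq_map, List.filterMap_cons,
    List.filterMap_map, hcomp]
  by_cases hx : x = "*" <;> by_cases h0 : xs[0]?.getD "" = "*" <;>
    simp [hx, h0, List.headD_eq_head?_getD, List.head?_eq_getElem?]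

theorem pvSIdx_eq_rec (l : List String) (b : Bool) (pos : Int) :
    pvSIdx l b pos = pvSRec l b pos := by
  induction l generalizing b pos with
  | nil => simp [pvSIdx, pvSRec]
  | cons x xs ih => rw [pvSIdx_cons, pvSRec, ih]

theorem pvEIdx_eq_rec (l : List String) (pos : Int) :
    pvEIdx l pos = pvERec l pos := by
  induction l generalizing pos with
  | nil => simp [pvEIdx, pvERec]
  | cons x xs ih => rw [pvEIdx_cons, pvERec, ih]

-- B's literal comprehensions coincide with the generalized index forms
theorem pvStarts_lit (l : List String) :
    (List.range l.length).filterMap (fun i =>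
      if l.getD i "" = "*" ∧ (i = 0 ∨ ¬ l.getD (i - 1) "" = "*")
      then some ((i : Int) + 1) else none) = pvSIdx l false 1 := by
  unfold pvSIdx
  congr 1
  funext i
  cases i with
  | zero => simp
  | succ k => simp [add_comm]

theorem pvEnds_lit (l : List String) :
    (List.range l.length).filterMap (fun i =>
      if l.getD i "" = "*" ∧ (i = l.length - 1 ∨ ¬ l.getD (i + 1) "" = "*")
      then some ((i : Int) + 1) else none) = pvEIdx l 1 := by
  unfold pvEIdx
  congr 1
  funext i
  by_cases hi : i = l.length - 1
  · have hg : l[1 + (l.length - 1)]? = (none : Option String) := List.getElem?_eq_none (by omega)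
    simp [hi, hg, add_comm]
  · simp [hi, add_comm]

-- traversal lemmas for a block of stars / of non-stars
theorem pvSRec_stars (g rest : List String) (pos : Int)
    (hg : ∀ y ∈ g, y = "*") :
    pvSRec (g ++ rest) true pos = pvSRec rest true (pos + g.length) := by
  induction g generalizing pos with
  | nil => simp
  | cons x g' ih =>
    have hx : x = "*" := hg x (by simp)
    subst hx
    rw [List.cons_append, pvSRec]
    simp only [beq_self_eq_true, Bool.true_eq_false, and_false, if_false, List.nil_append]
    rw [ih (pos + 1) (fun y hy => hg y (List.mem_cons_of_mem _ hy))]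
    congr 1
    simp only [List.length_cons]; push_cast; ring

theorem pvSRec_flag (rest : List String) (pos : Int)
    (h : ¬ rest.headD "" = "*") :
    pvSRec rest true pos = pvSRec rest false pos := by
  cases rest with
  | nil => rfl
  | cons y ys =>
    have hy : ¬ y = "*" := by simpa using h
    simp [pvSRec, hy]

theorem pvERec_stars (g rest : List String) (pos : Int)
    (hg : ∀ y ∈ g, y = "*") (hr : ¬ rest.headD "" = "*") :
    pvERec (("*" :: g) ++ rest) pos = (pos + g.length) :: pvERec rest (pos + g.length + 1) := by
  induction g generalizing pos with
  | nil =>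
    cases rest with
    | nil => simp [pvERec]
    | cons y ys =>
      have hy : ¬ y = "*" := by simpa using hr
      simp [pvERec, hy]
  | cons x g' ih =>
    have hx : x = "*" := hg x (by simp)
    subst hx
    rw [List.cons_append, pvERec]
    have hh : ((("*" :: g') ++ rest).headD "") = "*" := by simp
    simp only [hh, not_true_eq_false, and_false, if_false, List.nil_append]
    rw [ih (pos + 1) (fun y hy => hg y (List.mem_cons_of_mem _ hy))]
    congr 1
    · simp only [List.length_cons]; push_cast; ring
    · congr 1; simp only [List.length_cons]; push_cast; ring

theorem pvSRec_nonstars (g rest : List String) (pos : Int) (b : Bool)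
    (hg : ∀ y ∈ g, ¬ y = "*") (hne : g ≠ []) :
    pvSRec (g ++ rest) b pos = pvSRec rest false (pos + g.length) := by
  induction g generalizing pos b with
  | nil => exact absurd rfl hne
  | cons x g' ih =>
    have hx : ¬ x = "*" := hg x (by simp)
    have hb : (x == "*") = false := by simpa using hx
    rw [List.cons_append, pvSRec]
    simp only [hx, false_and, if_false, List.nil_append, hb]
    cases g' with
    | nil => simp
    | cons z g'' =>
      rw [ih (pos + 1) false (fun y hy => hg y (List.mem_cons_of_mem _ hy)) (by simp)]
      congr 1
      simp only [List.length_cons]; push_cast; ring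

theorem pvERec_nonstars (g rest : List String) (pos : Int)
    (hg : ∀ y ∈ g, ¬ y = "*") :
    pvERec (g ++ rest) pos = pvERec rest (pos + g.length) := by
  induction g generalizing pos with
  | nil => simp
  | cons x g' ih =>
    have hx : ¬ x = "*" := hg x (by simp)
    rw [List.cons_append, pvERec]
    simp only [hx, false_and, if_false, List.nil_append]
    rw [ih (pos + 1) (fun y hy => hg y (List.mem_cons_of_mem _ hy))]
    congr 1
    simp only [List.length_cons]; push_cast; ring

-- drop past the takeWhile prefix is dropWhile
theorem pvDrop_takeWhile (p : String → Bool) (l : List String) :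
    l.drop (l.takeWhile p).length = l.dropWhile p := by
  induction l with
  | nil => simp
  | cons x xs ih =>
    by_cases h : p x
    · simp [List.takeWhile, List.dropWhile, h, ih]
    · simp [List.takeWhile, List.dropWhile, h]

theorem pvHead_dropWhile (p : String → Bool) (l : List String) (a : String)
    (h : (l.dropWhile p).head? = some a) : p a = false := by
  induction l with
  | nil => simp at h
  | cons x xs ih =>
    by_cases hp : p x
    · simp [List.dropWhile, hp] at h; exact ih h
    · simp [List.dropWhile, hp] at h; subst h; simpa using hp

theorem pvHeadD_dropWhile_ne (l : List String) (x : String) (hx : x ≠ "") :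
    ¬ (l.dropWhile (fun y => y == x)).headD "" = x := by
  cases hh : (l.dropWhile (fun y => y == x)).head? with
  | none => simp [List.headD_eq_head?_getD, hh]; intro h; exact hx h

  | some a =>
    have := pvHead_dropWhile (fun y => y == x) l a hh
    simp [List.headD_eq_head?_getD, hh]
    simpa using this

-- main bridge: grouped runs = zip of boundary scans
theorem pvRuns_eq_zip (l : List String) :
    ∀ pos : Int, pvRuns (pvGroups l) pos = (pvSRec l false pos).zip (pvERec l pos) := by
  fun_induction pvGroups l with
  | case1 => intro pos; simp [pvRuns, pvSRec, pvERec]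
  | case2 x xs run ih =>
    intro pos
    have hdrop : List.drop run.length xs = xs.dropWhile (fun y => y == x) :=
      pvDrop_takeWhile (fun y => y == x) xs
    have hxs : xs = run ++ xs.dropWhile (fun y => y == x) :=
      (List.takeWhile_append_dropWhile (p := fun y => y == x) (l := xs)).symm
    have hrun : ∀ y ∈ run, y = x := fun y hy => by
      simpa using List.mem_takeWhile_imp hy
    rw [hdrop, pvRuns]
    by_cases hx : x = "*"
    · subst hx
      have hr : ¬ (xs.dropWhile (fun y => y == "*")).headD "" = "*" :=
        pvHeadD_dropWhile_ne xs "*" (by decide)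
      have hS : pvSRec ("*" :: xs) false pos
          = pos :: pvSRec (xs.dropWhile (fun y => y == "*")) false (pos + 1 + run.length) := by
        rw [pvSRec, if_pos ⟨rfl, rfl⟩, List.singleton_append]
        conv_lhs => rw [hxs]
        rw [show (("*" : String) == "*") = true from rfl,
          pvSRec_stars run _ (pos + 1) hrun, pvSRec_flag _ _ hr]
      have hE : pvERec ("*" :: xs) pos
          = (pos + run.length) :: pvERec (xs.dropWhile (fun y => y == "*")) (pos + run.length + 1) := by
        conv_lhs => rw [hxs, ← List.cons_append]
        exact pvERec_stars run _ pos hrun hr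
      rw [hdrop] at ih
      rw [hS, hE, List.zip_cons_cons,
        show pos + 1 + (run.length : Int) = pos + run.length + 1 from by ring,
        ← ih (pos + run.length + 1), if_pos rfl, List.singleton_append]
      congr 2
      · push_cast; ring
      · push_cast; ring
    · have hg : ∀ y ∈ (x :: run), ¬ y = "*" := by
        intro y hy
        rcases List.mem_cons.1 hy with h | h
        · subst h; exact hx
        · rw [hrun y h]; exact hx
      have hS : pvSRec (x :: xs) false pos
          = pvSRec (xs.dropWhile (fun y => y == x)) false (pos + (run.length + 1)) := by
        conv_lhs => rw [hxs, ← List.cons_append]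
        rw [pvSRec_nonstars (x :: run) _ pos false hg (by simp)]
        norm_num [List.length_cons]
      have hE : pvERec (x :: xs) pos
          = pvERec (xs.dropWhile (fun y => y == x)) (pos + (run.length + 1)) := by
        conv_lhs => rw [hxs, ← List.cons_append]
        rw [pvERec_nonstars (x :: run) _ pos hg]
        norm_num [List.length_cons]
      rw [hdrop] at ih
      rw [hS, hE, ← ih (pos + ((run.length : Int) + 1)), if_neg hx, List.nil_append]
      norm_num

-- ===== VERDICT (by name: the statement is the Claim_ definition above) =====
theorem find_conserved_runs_spec : Claim_equal_find_conserved_runs := by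
  intro symbols _
  show find_conserved_runs symbols = find_conserved_runs_alt symbols
  rw [find_conserved_runs, pvAloop_eq]
  show pvRuns (pvGroups symbols) 1 = _
  rw [find_conserved_runs_alt]
  simp only [pvStarts_lit, pvEnds_lit, pvSIdx_eq_rec, pvEIdx_eq_rec]
  rw [pvRuns_eq_zip]
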